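-- pv_equiv track=rewrite | github.com/dmarek03/ALGORITHM_AND_DATA_STRUCTURE | offline_asd/zad2_snow/zad2.py | get_max_sum1
-- ===== SOURCE A (Python) =====
-- def max_heap(array: list[int], heap_size: int, root_idx: int):
--     largest = root_idx
--     left = 2 * root_idx + 1
--     right = 2 * root_idx + 2
--
--     if left < heap_size and array[left] > array[largest]:
--         largest = left
--
--     if right < heap_size and array[right] > array[largest]:
--         largest = right
--
--     if largest != root_idx:
--         array[largest], array[root_idx] = array[root_idx], array[largest]
--         max_heap(array, heap_size, largest)
--
-- def get_max_sum1(array: list[int]) -> int: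
--     n = len(array)
--     sum1 = 0
--     for i in range((n // 2) - 1, -1, -1):
--         max_heap(array, n, i)
--
--     for i in range(n):
--         if array[0] - i > 0:
--             sum1 += array[0] - i
--             array[n - i - 1], array[0] = array[0], array[n - i - 1]
--             max_heap(array, n - i - 1, 0)
--
--         else:
--             break
--     return sum1
-- ===== SOURCE B (Python) =====
-- def get_max_sum1(array: list[int]) -> int:
--     total = 0
--     for i, v in enumerate(sorted(array, reverse=True)):
--         d = v - i
--         if d <= 0:
--             break
--         total += d
--     return total
-- ===== Notes on version B (the rewrite author's own statement) =====
-- stated objective: simpler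
-- what changed: Replaces the in-place heap build plus repeated extract-and-reheapify with a descending sort of a copy followed by one linear scan adding s[i]-i while positive; same O(n log n) but the comparisons move from pure-Python sift-down recursion into the built-in sorted(), a constant-factor win.
import Mathlib
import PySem

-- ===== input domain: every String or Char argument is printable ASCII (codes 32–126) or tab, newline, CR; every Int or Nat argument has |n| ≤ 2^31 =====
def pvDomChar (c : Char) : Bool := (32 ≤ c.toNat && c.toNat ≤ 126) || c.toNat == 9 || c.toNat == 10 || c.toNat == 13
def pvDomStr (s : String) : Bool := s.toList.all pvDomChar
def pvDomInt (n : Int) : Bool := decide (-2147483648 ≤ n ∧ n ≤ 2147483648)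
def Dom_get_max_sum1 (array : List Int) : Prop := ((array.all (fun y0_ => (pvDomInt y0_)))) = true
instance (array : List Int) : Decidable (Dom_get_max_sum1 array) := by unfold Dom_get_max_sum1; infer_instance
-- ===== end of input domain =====

-- B replaces A's in-place heap build and repeated extract-and-reheapify by a descending sort of a
-- copy followed by one linear scan (objective: simpler).  A mutates its argument list in place
-- (heapify and swaps) while B does not; the equivalence proved here is about the RETURN value only.

-- ===== PORT A =====
-- Python's simultaneous swap  array[i], array[j] = array[j], array[i]  (indices in range in every use)
def pySwap (a : List Int) (i j : Nat) : List Int := (a.set i (a.getD j 0)).set j (a.getD i 0)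

-- the index `largest` after the first if-statement of max_heap
def pyLargest1 (a : List Int) (m r : Nat) : Nat :=
  if 2*r+1 < m ∧ a.getD r 0 < a.getD (2*r+1) 0 then 2*r+1 else r

-- the index `largest` after the second if-statement of max_heap
def pyLargest (a : List Int) (m r : Nat) : Nat :=
  if 2*r+2 < m ∧ a.getD (pyLargest1 a m r) 0 < a.getD (2*r+2) 0 then 2*r+2 else pyLargest1 a m r

theorem pyLargest_cases (a : List Int) (m r : Nat) :
    pyLargest a m r = r ∨ (r < pyLargest a m r ∧ pyLargest a m r < m) := by
  unfold pyLargest pyLargest1; split_ifs <;> omega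

-- max_heap(array, heap_size, root_idx): sift the root down (indices are in range whenever read)
def maxHeap (a : List Int) (m r : Nat) : List Int :=
  if _h : pyLargest a m r ≠ r then maxHeap (pySwap a (pyLargest a m r) r) m (pyLargest a m r) else a
termination_by m - r
decreasing_by have := pyLargest_cases a m r; omega

-- first loop of get_max_sum1: for i in range((n//2)-1, -1, -1): max_heap(array, n, i)
def buildLoop (n : Nat) : List Int → Nat → List Int
  | a, 0 => a
  | a, k+1 => buildLoop n (maxHeap a n k) k

-- second loop of get_max_sum1, with fuel n - i and the running sum
def extractLoop (n : Nat) : Nat → List Int → Nat → Int → Int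
  | 0, _, _, s => s
  | fuel+1, a, i, s =>
      if 0 < a.getD 0 0 - (i : Int) then
        extractLoop n fuel (maxHeap (pySwap a (n-i-1) 0) (n-i-1) 0) (i+1) (s + (a.getD 0 0 - (i : Int)))
      else s

def get_max_sum1 (array : List Int) : Int :=
  extractLoop array.length array.length (buildLoop array.length array (array.length / 2)) 0 0

-- ===== PORT B =====
-- for i, v in enumerate(sorted(array, reverse=True)): d = v - i; if d <= 0: break; total += d
def altLoop : List Int → Nat → Int → Int
  | [], _, t => t
  | v :: rest, i, t => if v - (i : Int) ≤ 0 then t else altLoop rest (i+1) (t + (v - (i : Int)))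

def get_max_sum1_alt (array : List Int) : Int :=
  altLoop (PySem.List.sorted array (fun x => x) true) 0 0

-- ===== PRECONDITION & SPEC =====
def Spec_get_max_sum1 (array : List Int) (out : Int) : Prop := out = get_max_sum1_alt array
instance (array : List Int) (out : Int) : Decidable (Spec_get_max_sum1 array out) := by unfold Spec_get_max_sum1; infer_instance

-- ===== CLAIM (what is proved, stated in full; the proofs are below) =====
def Claim_equal_get_max_sum1 : Prop := ∀ (array : List Int), Dom_get_max_sum1 array → Spec_get_max_sum1 array (get_max_sum1 array)

-- ===== LEMMAS AND PROOFS =====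

-- heap property from index k on: every node j ≥ k dominates its children that lie below m
def HeapFrom (a : List Int) (m k : Nat) : Prop :=
  ∀ j, k ≤ j → (2*j+1 < m → a.getD (2*j+1) 0 ≤ a.getD j 0) ∧ (2*j+2 < m → a.getD (2*j+2) 0 ≤ a.getD j 0)

-- j lies in the binary-heap subtree rooted at r
def inSub (r j : Nat) : Bool :=
  if j < r then false
  else if j = r then true
  else inSub r ((j-1)/2)
termination_by j
decreasing_by omega

theorem inSub_self (r : Nat) : inSub r r = true := by
  rw [inSub]; simp

theorem inSub_false_of_lt {r j : Nat} (h : j < r) : inSub r j = false := by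
  rw [inSub, if_pos h]

theorem le_of_inSub {r j : Nat} (h : inSub r j = true) : r ≤ j := by
  rw [inSub] at h
  split_ifs at h <;> omega

theorem inSub_false_of_parent_lt {r j : Nat} (hp : (j-1)/2 < r) (hne : j ≠ r) : inSub r j = false := by
  rcases Nat.lt_or_ge j r with h1 | h1
  · exact inSub_false_of_lt h1
  · rw [inSub, if_neg (by omega), if_neg hne]
    exact inSub_false_of_lt hp

theorem inSub_child_left (r : Nat) : inSub r (2*r+1) = true := by
  have h : (2*r+1-1)/2 = r := by omega
  rw [inSub, if_neg (by omega), if_neg (by omega), h, inSub_self]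

theorem inSub_child_right (r : Nat) : inSub r (2*r+2) = true := by
  have h : (2*r+2-1)/2 = r := by omega
  rw [inSub, if_neg (by omega), if_neg (by omega), h, inSub_self]

theorem inSub_trans (r l : Nat) : ∀ j, inSub l j = true → inSub r l = true → inSub r j = true := by
  intro j
  induction j using Nat.strong_induction_on with
  | _ j ih =>
    intro h2 h1
    by_cases hlt : j < l
    · rw [inSub_false_of_lt hlt] at h2; cases h2
    · by_cases heq : j = l
      · subst heq; exact h1
      · have hr : r ≤ l := le_of_inSub h1
        have h2' : inSub l ((j-1)/2) = true := by
          rw [inSub, if_neg hlt, if_neg heq] at h2; exact h2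
        have hrec := ih ((j-1)/2) (by omega) h2' h1
        rw [inSub, if_neg (by omega), if_neg (by omega)]
        exact hrec

theorem getD_set_ne (l : List Int) (k j : Nat) (v : Int) (h : k ≠ j) :
    (l.set k v).getD j 0 = l.getD j 0 := by
  simp [List.getD_eq_getElem?_getD, List.getElem?_set_ne h]

theorem getD_set_self (l : List Int) (k : Nat) (v : Int) (h : k < l.length) :
    (l.set k v).getD k 0 = v := by
  simp [List.getD_eq_getElem?_getD, h]

theorem pySwap_length (a : List Int) (x y : Nat) : (pySwap a x y).length = a.length := by
  simp [pySwap]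

theorem getD_pySwap_of_ne (a : List Int) (x y j : Nat) (hx : j ≠ x) (hy : j ≠ y) :
    (pySwap a x y).getD j 0 = a.getD j 0 := by
  unfold pySwap
  rw [getD_set_ne _ _ _ _ (fun h => hy h.symm), getD_set_ne _ _ _ _ (fun h => hx h.symm)]

theorem getD_pySwap_fst (a : List Int) (x y : Nat) (hx : x < a.length) (hxy : x ≠ y) :
    (pySwap a x y).getD x 0 = a.getD y 0 := by
  unfold pySwap
  rw [getD_set_ne _ _ _ _ (fun h => hxy h.symm), getD_set_self _ _ _ hx]

theorem getD_pySwap_snd (a : List Int) (x y : Nat) (hy : y < a.length) :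
    (pySwap a x y).getD y 0 = a.getD x 0 := by
  unfold pySwap
  rw [getD_set_self _ _ _ (by simpa using hy)]

-- the value at `pyLargest` dominates root and both children in range
theorem le_pyLargest_root (a : List Int) (m r : Nat) :
    a.getD r 0 ≤ a.getD (pyLargest a m r) 0 := by
  unfold pyLargest pyLargest1; split_ifs <;> omega

theorem le_pyLargest_left (a : List Int) (m r : Nat) (h : 2*r+1 < m) :
    a.getD (2*r+1) 0 ≤ a.getD (pyLargest a m r) 0 := by
  unfold pyLargest pyLargest1; split_ifs <;> omega

theorem le_pyLargest_right (a : List Int) (m r : Nat) (h : 2*r+2 < m) :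
    a.getD (2*r+2) 0 ≤ a.getD (pyLargest a m r) 0 := by
  unfold pyLargest pyLargest1; split_ifs <;> omega

theorem pyLargest_shape (a : List Int) (m r : Nat) :
    pyLargest a m r = r ∨ pyLargest a m r = 2*r+1 ∨ pyLargest a m r = 2*r+2 := by
  unfold pyLargest pyLargest1; split_ifs <;> omega

theorem maxHeap_length (a : List Int) (m r : Nat) : (maxHeap a m r).length = a.length := by
  fun_induction maxHeap a m r with
  | case1 a r hcond ih => rw [ih, pySwap_length]
  | case2 => rfl

theorem maxHeap_getD_out (a : List Int) (m r j : Nat) (h : inSub r j = false) :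
    (maxHeap a m r).getD j 0 = a.getD j 0 := by
  fun_induction maxHeap a m r with
  | case1 a r hne ih =>
    have hjr : j ≠ r := by intro he; rw [he, inSub_self] at h; cases h
    have hchild : inSub r (pyLargest a m r) = true := by
      rcases pyLargest_shape a m r with h1 | h1 | h1
      · exact absurd h1 hne
      · rw [h1]; exact inSub_child_left r
      · rw [h1]; exact inSub_child_right r
    have hjlg : j ≠ pyLargest a m r := by
      intro he; rw [he] at h; rw [hchild] at h; cases h
    have hsub : inSub (pyLargest a m r) j = false := by
      by_contra hc
      have := inSub_trans r (pyLargest a m r) j (by simpa using hc) hchild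
      rw [this] at h; cases h
    rw [ih hsub, getD_pySwap_of_ne _ _ _ _ hjlg hjr]
  | case2 => rfl

-- swapping two in-range positions is a permutation
theorem set_cons_perm (d : Int) : ∀ (t : List Int) (m : Nat) (v : Int), m < t.length →
    (t.getD m d :: t.set m v).Perm (v :: t) := by
  intro t
  induction t with
  | nil => intro m v h; simp at h
  | cons b u ih =>
    intro m v h
    cases m with
    | zero => simpa using List.Perm.swap v b u
    | succ m =>
      have h' : m < u.length := by simpa using h
      have p1 : (u.getD m d :: b :: u.set m v).Perm (b :: u.getD m d :: u.set m v) :=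
        List.Perm.swap b (u.getD m d) (u.set m v)
      have p2 : (b :: u.getD m d :: u.set m v).Perm (b :: v :: u) := (ih m v h').cons b
      have p3 : (b :: v :: u).Perm (v :: b :: u) := List.Perm.swap v b u
      exact (p1.trans p2).trans p3

theorem set_set_perm : ∀ (l : List Int) (x y : Nat), x < l.length → y < l.length →
    ((l.set x (l.getD y 0)).set y (l.getD x 0)).Perm l := by
  intro l
  induction l with
  | nil => intro x y hx; simp at hx
  | cons a t ih =>
    intro x y hx hy
    cases x with
    | zero =>
      cases y with
      | zero => simp
      | succ m =>
        have hm : m < t.length := by simpa using hy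
        have e1 : ((a :: t).set 0 ((a :: t).getD (m+1) 0)) = t.getD m 0 :: t := by simp
        rw [e1]
        have e2 : ((t.getD m 0 :: t).set (m+1) ((a :: t).getD 0 0)) = t.getD m 0 :: t.set m a := by simp
        rw [e2]
        exact (set_cons_perm 0 t m a hm).trans (List.Perm.refl _)
    | succ k =>
      cases y with
      | zero =>
        have hk : k < t.length := by simpa using hx
        have e1 : ((a :: t).set (k+1) ((a :: t).getD 0 0)) = a :: t.set k a := by simp
        rw [e1]
        have e2 : ((a :: t.set k a).set 0 ((a :: t).getD (k+1) 0)) = t.getD k 0 :: t.set k a := by simp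
        rw [e2]
        exact set_cons_perm 0 t k a hk
      | succ m =>
        have hk : k < t.length := by simpa using hx
        have hm : m < t.length := by simpa using hy
        have e : ((a :: t).set (k+1) ((a :: t).getD (m+1) 0)).set (m+1) ((a :: t).getD (k+1) 0)
            = a :: ((t.set k (t.getD m 0)).set m (t.getD k 0)) := by simp
        rw [e]
        exact List.Perm.cons a (ih k m hk hm)

theorem getD_take (a : List Int) (m j : Nat) (h : j < m) : (a.take m).getD j 0 = a.getD j 0 := by
  simp [List.getD_eq_getElem?_getD, h]

theorem pySwap_take_perm (a : List Int) (x y m : Nat) (hx : x < m) (hy : y < m) (hm : m ≤ a.length) :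
    ((pySwap a x y).take m).Perm (a.take m) := by
  have e : (pySwap a x y).take m = pySwap (a.take m) x y := by
    unfold pySwap
    rw [List.take_set, List.take_set, getD_take a m y hy, getD_take a m x hx]
  rw [e]
  have hlen : (a.take m).length = m := by simp [Nat.min_eq_left hm]
  exact set_set_perm (a.take m) x y (by omega) (by omega)

theorem maxHeap_take_perm (a : List Int) (m r : Nat) (hm : m ≤ a.length) :
    ((maxHeap a m r).take m).Perm (a.take m) := by
  fun_induction maxHeap a m r with
  | case1 a r hne ih =>
    have hc := pyLargest_cases a m r
    have hrlg : r < pyLargest a m r ∧ pyLargest a m r < m := by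
      rcases hc with h | h
      · exact absurd h hne
      · exact h
    have hswap := pySwap_take_perm a (pyLargest a m r) r m hrlg.2 (by omega) hm
    exact (ih (by rw [pySwap_length]; exact hm)).trans hswap
  | case2 => exact List.Perm.refl _

-- the root of a sifted subtree stays below any bound dominating root and children
theorem maxHeap_root_le (a : List Int) (m r : Nat) (b : Int) (hm : m ≤ a.length)
    (hr : a.getD r 0 ≤ b)
    (hl : 2*r+1 < m → a.getD (2*r+1) 0 ≤ b)
    (hrt : 2*r+2 < m → a.getD (2*r+2) 0 ≤ b) :
    (maxHeap a m r).getD r 0 ≤ b := by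
  rw [maxHeap]
  by_cases hne : pyLargest a m r = r
  · rw [dif_neg (by simpa using hne)]; exact hr
  · rw [dif_pos hne]
    have hrlg : r < pyLargest a m r ∧ pyLargest a m r < m := by
      rcases pyLargest_cases a m r with h | h
      · exact absurd h hne
      · exact h
    have hout : (maxHeap (pySwap a (pyLargest a m r) r) m (pyLargest a m r)).getD r 0
        = (pySwap a (pyLargest a m r) r).getD r 0 :=
      maxHeap_getD_out _ _ _ _ (inSub_false_of_lt hrlg.1)
    rw [hout, getD_pySwap_snd _ _ _ (by omega)]
    rcases pyLargest_shape a m r with h1 | h1 | h1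
    · exact absurd h1 hne
    · rw [h1]; exact hl (h1 ▸ hrlg.2)
    · rw [h1]; exact hrt (h1 ▸ hrlg.2)

-- the sift-down lemma: heapifying the root extends the heap property from r+1 to r
theorem sift (m : Nat) : ∀ k a r, m - r = k → m ≤ a.length → HeapFrom a m (r+1) →
    HeapFrom (maxHeap a m r) m r := by
  intro k
  induction k using Nat.strong_induction_on with
  | _ k ih =>
    intro a r hk hm h
    rw [maxHeap]
    by_cases hne : pyLargest a m r = r
    · rw [dif_neg (by simpa using hne)]
      intro j hj
      rcases Nat.eq_or_lt_of_le hj with he | hlt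
      · subst he
        constructor
        · intro hl
          have hv := le_pyLargest_left a m r hl
          rw [hne] at hv; exact hv
        · intro hr
          have hv := le_pyLargest_right a m r hr
          rw [hne] at hv; exact hv
      · exact h j hlt
    · rw [dif_pos hne]
      have hrlg : r < pyLargest a m r ∧ pyLargest a m r < m := by
        rcases pyLargest_cases a m r with h1 | h1
        · exact absurd h1 hne
        · exact h1
      set lg := pyLargest a m r with hlg
      have hshape : lg = 2*r+1 ∨ lg = 2*r+2 := by
        rcases pyLargest_shape a m r with h1 | h1 | h1
        · exact absurd h1 hne
        · exact Or.inl h1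
        · exact Or.inr h1
      have h2 : HeapFrom (pySwap a lg r) m (lg+1) := by
        intro j hj
        have hj1 : (pySwap a lg r).getD j 0 = a.getD j 0 :=
          getD_pySwap_of_ne _ _ _ _ (by omega) (by omega)
        have hjl : (pySwap a lg r).getD (2*j+1) 0 = a.getD (2*j+1) 0 :=
          getD_pySwap_of_ne _ _ _ _ (by omega) (by omega)
        have hjr : (pySwap a lg r).getD (2*j+2) 0 = a.getD (2*j+2) 0 :=
          getD_pySwap_of_ne _ _ _ _ (by omega) (by omega)
        rw [hj1, hjl, hjr]
        exact h j (by omega)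
      have h3 : HeapFrom (maxHeap (pySwap a lg r) m lg) m lg :=
        ih (m - lg) (by omega) (pySwap a lg r) lg rfl (by rw [pySwap_length]; exact hm) h2
      intro j hj
      by_cases hjlg : lg ≤ j
      · exact h3 j hjlg
      · have hjlt : j < lg := by omega
        by_cases hjr : j = r
        · subst hjr
          have hroot : (maxHeap (pySwap a lg j) m lg).getD j 0 = a.getD lg 0 := by
            rw [maxHeap_getD_out _ _ _ _ (inSub_false_of_lt hrlg.1),
              getD_pySwap_snd _ _ _ (by omega)]
          constructor
          · intro hl
            rw [hroot]
            rcases hshape with hs | hs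
            · -- left child is lg: bound the sifted subtree root
              rw [← hs]
              apply maxHeap_root_le _ _ _ _ (by rw [pySwap_length]; exact hm)
              · rw [getD_pySwap_fst _ _ _ (by omega) (by omega)]
                exact le_pyLargest_root a m j
              · intro hc
                rw [getD_pySwap_of_ne _ _ _ _ (by omega) (by omega)]
                exact (h lg (by omega)).1 hc
              · intro hc
                rw [getD_pySwap_of_ne _ _ _ _ (by omega) (by omega)]
                exact (h lg (by omega)).2 hc
            · -- left child is not lg: its value is untouched
              rw [maxHeap_getD_out _ _ _ _ (inSub_false_of_lt (by omega)),
                getD_pySwap_of_ne _ _ _ _ (by omega) (by omega)]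
              exact le_pyLargest_left a m j hl
          · intro hr
            rw [hroot]
            rcases hshape with hs | hs
            · rw [maxHeap_getD_out _ _ _ _ (inSub_false_of_parent_lt (by omega) (by omega)),
                getD_pySwap_of_ne _ _ _ _ (by omega) (by omega)]
              exact le_pyLargest_right a m j hr
            · rw [← hs]
              apply maxHeap_root_le _ _ _ _ (by rw [pySwap_length]; exact hm)
              · rw [getD_pySwap_fst _ _ _ (by omega) (by omega)]
                exact le_pyLargest_root a m j
              · intro hc
                rw [getD_pySwap_of_ne _ _ _ _ (by omega) (by omega)]
                exact (h lg (by omega)).1 hc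
              · intro hc
                rw [getD_pySwap_of_ne _ _ _ _ (by omega) (by omega)]
                exact (h lg (by omega)).2 hc
        · -- r < j < lg: node and children untouched
          have hj1 : (maxHeap (pySwap a lg r) m lg).getD j 0 = a.getD j 0 := by
            rw [maxHeap_getD_out _ _ _ _ (inSub_false_of_lt hjlt),
              getD_pySwap_of_ne _ _ _ _ (by omega) (by omega)]
          have hcl : (maxHeap (pySwap a lg r) m lg).getD (2*j+1) 0 = a.getD (2*j+1) 0 := by
            rw [maxHeap_getD_out _ _ _ _
                (inSub_false_of_parent_lt (by omega) (by omega)),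
              getD_pySwap_of_ne _ _ _ _ (by omega) (by omega)]
          have hcr : (maxHeap (pySwap a lg r) m lg).getD (2*j+2) 0 = a.getD (2*j+2) 0 := by
            rw [maxHeap_getD_out _ _ _ _
                (inSub_false_of_parent_lt (by omega) (by omega)),
              getD_pySwap_of_ne _ _ _ _ (by omega) (by omega)]
          rw [hj1, hcl, hcr]
          exact h j (by omega)

theorem heap_root_max (a : List Int) (m : Nat) (h : HeapFrom a m 0) :
    ∀ j, j < m → a.getD j 0 ≤ a.getD 0 0 := by
  intro j
  induction j using Nat.strong_induction_on with
  | _ j ih =>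
    intro hj
    rcases Nat.eq_zero_or_pos j with h0 | h0
    · subst h0; exact le_refl _
    · have hpar : j = 2*((j-1)/2)+1 ∨ j = 2*((j-1)/2)+2 := by omega
      have hplt : (j-1)/2 < j := by omega
      have hpm : (j-1)/2 < m := by omega
      have hstep : a.getD j 0 ≤ a.getD ((j-1)/2) 0 := by
        rcases hpar with he | he
        · have := (h ((j-1)/2) (Nat.zero_le _)).1 (by omega)
          rw [← he] at this; exact this
        · have := (h ((j-1)/2) (Nat.zero_le _)).2 (by omega)
          rw [← he] at this; exact this
      exact hstep.trans (ih ((j-1)/2) hplt hpm)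

theorem build_heap (n : Nat) : ∀ (k : Nat) (a : List Int), n ≤ a.length → HeapFrom a n k →
    HeapFrom (buildLoop n a k) n 0 ∧ ((buildLoop n a k).take n).Perm (a.take n) ∧
      (buildLoop n a k).length = a.length := by
  intro k
  induction k with
  | zero =>
    intro a hm h
    exact ⟨h, List.Perm.refl _, rfl⟩
  | succ k ih =>
    intro a hm h
    simp only [buildLoop]
    have hh : HeapFrom (maxHeap a n k) n k := sift n (n - k) a k rfl hm h
    have hlen : (maxHeap a n k).length = a.length := maxHeap_length a n k
    obtain ⟨h1, h2, h3⟩ := ih (maxHeap a n k) (by omega) hh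
    refine ⟨h1, h2.trans (maxHeap_take_perm a n k hm), by omega⟩

theorem extract_eq (s : List Int) (hs : s.Pairwise (fun x y => y ≤ x)) (n : Nat) (hn : n = s.length) :
    ∀ (fuel : Nat) (a : List Int) (i : Nat) (t : Int), a.length = n → fuel = n - i → i ≤ n →
      HeapFrom a (n - i) 0 → ((a.take (n - i)).Perm (s.drop i)) →
      extractLoop n fuel a i t = altLoop (s.drop i) i t := by
  intro fuel
  induction fuel with
  | zero =>
    intro a i t hlen hf hi hh hp
    have hin : i = n := by omega
    subst hin
    have hnil : s.drop i = [] := by rw [hn]; exact List.drop_length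
    rw [hnil]
    rfl
  | succ fuel ih =>
    intro a i t hlen hf hi hh hp
    have hi' : i < n := by omega
    have hin : i < s.length := by omega
    have hd : s.drop i = s[i] :: s.drop (i+1) := List.drop_eq_getElem_cons hin
    have h0len : 0 < a.length := by omega
    have ha0 : a.getD 0 0 = s[i] := by
      have hmax := heap_root_max a (n - i) hh
      have hsi_mem : s[i] ∈ a.take (n - i) := by
        apply hp.symm.subset
        rw [hd]; exact List.mem_cons_self
      obtain ⟨j, hj, hje⟩ := List.mem_iff_getElem.mp hsi_mem
      have hjlen : j < n - i := by
        have : (a.take (n-i)).length = min (n-i) a.length := by simp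
        omega
      have h1 : s[i] ≤ a.getD 0 0 := by
        have hmj := hmax j hjlen
        rw [List.getElem_take] at hje
        rw [List.getD_eq_getElem a 0 (by omega)] at hmj
        rw [← hje]
        exact hmj
      have h2 : a.getD 0 0 ≤ s[i] := by
        have hmem0 : a.getD 0 0 ∈ a.take (n - i) := by
          rw [List.getD_eq_getElem a 0 h0len]
          apply List.mem_iff_getElem.mpr
          refine ⟨0, by simp; omega, ?_⟩
          rw [List.getElem_take]
        have hmem : a.getD 0 0 ∈ s.drop i := hp.subset hmem0
        rw [hd] at hmem
        rcases List.mem_cons.mp hmem with he | hmem'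
        · omega
        · have hpw : (s.drop i).Pairwise (fun x y => y ≤ x) := hs.sublist (List.drop_sublist i s)
          rw [hd] at hpw
          exact (List.pairwise_cons.mp hpw).1 _ hmem'
      omega
    rw [hd]
    simp only [extractLoop, altLoop, ha0]
    by_cases hpos : 0 < s[i] - (i : Int)
    · rw [if_pos hpos, if_neg (by omega)]
      have hlen2 : (maxHeap (pySwap a (n-i-1) 0) (n-i-1) 0).length = n := by
        rw [maxHeap_length, pySwap_length]; exact hlen
      -- heap property of the shrunk heap
      have hh2 : HeapFrom (maxHeap (pySwap a (n-i-1) 0) (n-i-1) 0) (n - (i+1)) 0 := by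
        have heq : n - (i+1) = n - i - 1 := by omega
        rw [heq]
        apply sift (n-i-1) (n-i-1) _ 0 rfl (by rw [pySwap_length]; omega)
        intro j hj
        constructor
        · intro hc
          rw [getD_pySwap_of_ne _ _ _ _ (by omega) (by omega),
            getD_pySwap_of_ne _ _ _ _ (by omega) (by omega)]
          exact (hh j (Nat.zero_le _)).1 (by omega)
        · intro hc
          rw [getD_pySwap_of_ne _ _ _ _ (by omega) (by omega),
            getD_pySwap_of_ne _ _ _ _ (by omega) (by omega)]
          exact (hh j (Nat.zero_le _)).2 (by omega)
      -- permutation invariant of the shrunk heap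
      have hp2 : ((maxHeap (pySwap a (n-i-1) 0) (n-i-1) 0).take (n - (i+1))).Perm (s.drop (i+1)) := by
        have heq : n - (i+1) = n - i - 1 := by omega
        rw [heq]
        rcases Nat.eq_zero_or_pos (n - i - 1) with hz | hpos'
        · rw [hz]
          have hnil : s.drop (i+1) = [] := List.drop_eq_nil_of_le (by omega)
          rw [hnil]; simp
        · have step1 : ((maxHeap (pySwap a (n-i-1) 0) (n-i-1) 0).take (n-i-1)).Perm
              ((pySwap a (n-i-1) 0).take (n-i-1)) :=
            maxHeap_take_perm _ _ _ (by rw [pySwap_length]; omega)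
          have step2 : (pySwap a (n-i-1) 0).take (n-i-1)
              = (a.take (n-i-1)).set 0 (a.getD (n-i-1) 0) := by
            unfold pySwap
            rw [List.take_set, List.take_set_of_le (le_refl _)]
          have hy : a.getD (n-i-1) 0 = a[n-i-1]'(by omega) := List.getD_eq_getElem a 0 (by omega)
          have hT : a.take (n - i) = a.take (n-i-1) ++ [a.getD (n-i-1) 0] := by
            have he : n - i = (n-i-1) + 1 := by omega
            rw [List.getD_eq_getElem a 0 (show n-i-1 < a.length by omega)]
            conv_lhs => rw [he, List.take_add_one]
            rw [List.getElem?_eq_getElem (show n-i-1 < a.length by omega)]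
            rfl
          have hT1len : (a.take (n-i-1)).length = n-i-1 := by
            simp; omega
          have hT1 : a.take (n-i-1) = s[i] :: (a.take (n-i-1)).tail := by
            cases hc : a.take (n-i-1) with
            | nil => exfalso; rw [hc] at hT1len; simp at hT1len; omega
            | cons x xs =>
              have h01 := getD_take a (n-i-1) 0 (by omega)
              rw [hc] at h01
              have hx : x = s[i] := by rw [← ha0, ← h01]; simp
              simp [hx]
          have hflat : a.take (n-i) = s[i] :: ((a.take (n-i-1)).tail ++ [a.getD (n-i-1) 0]) := by
            rw [hT]
            conv_lhs => rw [hT1]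
            rfl
          have hrest : ((a.take (n-i-1)).tail ++ [a.getD (n-i-1) 0]).Perm (s.drop (i+1)) := by
            apply List.Perm.cons_inv (a := s[i])
            rw [← hd, ← hflat]
            exact hp
          have hset : (a.take (n-i-1)).set 0 (a.getD (n-i-1) 0)
              = a.getD (n-i-1) 0 :: (a.take (n-i-1)).tail := by
            conv_lhs => rw [hT1]
            rfl
          refine step1.trans ?_
          rw [step2, hset]
          exact ((List.perm_append_singleton _ _).symm).trans hrest
      exact ih _ (i+1) _ hlen2 (by omega) (by omega) hh2 hp2
    · rw [if_neg hpos, if_pos (by omega)]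

-- ===== VERDICT (by name: the statement is the Claim_ definition above) =====
theorem get_max_sum1_spec : Claim_equal_get_max_sum1 := by
  intro array _
  unfold Spec_get_max_sum1 get_max_sum1 get_max_sum1_alt
  have hperm : (PySem.List.sorted array (fun x => x) true).Perm array :=
    PySem.List.sorted_perm array (fun x => x) true
  have hn : array.length = (PySem.List.sorted array (fun x => x) true).length :=
    hperm.length_eq.symm
  have hs : (PySem.List.sorted array (fun x => x) true).Pairwise (fun x y => y ≤ x) :=
    PySem.List.sorted_pairwise_rev array (fun x => x)
  have hinit : HeapFrom array array.length (array.length / 2) := by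
    intro j hj; constructor <;> intro hc <;> omega
  obtain ⟨hh, hp, hlen⟩ :=
    build_heap array.length (array.length / 2) array (le_refl _) hinit
  have hres := extract_eq (PySem.List.sorted array (fun x => x) true) hs array.length hn
    array.length (buildLoop array.length array (array.length / 2)) 0 0
    hlen (by omega) (by omega)
    (by rw [Nat.sub_zero]; exact hh)
    (by
      rw [Nat.sub_zero, List.drop_zero]
      have h1 : array.take array.length = array := List.take_length
      rw [h1] at hp
      exact hp.trans hperm.symm)
  rw [List.drop_zero] at hres
  exact hres
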